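-- pv_equiv track=rewrite | github.com/lieuzhenghong/programming-practice | problems/jx_qn_2.py | profitTarget
-- ===== SOURCE A (Python) =====
-- from collections import defaultdict
-- from typing import List, Tuple
--
-- def profitTarget(stocksProfit: List[int], target: int) -> List[Tuple[int, int]]:
--     profitable_pairs = set()
--     complements = defaultdict(bool)
--     # Complements is a dictionary of
--     # int: List[int] denoting the indices of the shares
--     for idx, num in enumerate(stocksProfit):
--         complement = target - num
--         # Look for whether complement in dictionary
--         if complement in complements:
--             profitable_pairs.add(tuple(sorted((complement, num))))
--         complements[num] = True
--     return len(profitable_pairs)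
-- ===== SOURCE B (Python) =====
-- from collections import Counter
-- from typing import List
--
-- def profitTarget(stocksProfit: List[int], target: int):
--     # One pass over the distinct values instead of an incremental seen-set/pair-set:
--     # count each unordered value pair {v, target-v} once via its smaller member.
--     cnt = Counter(stocksProfit)
--     res = 0
--     for v in cnt:
--         c = target - v
--         if v < c and c in cnt:
--             res += 1
--         elif v == c and cnt[v] >= 2:
--             res += 1
--     return res
-- ===== Notes on version B (the rewrite author's own statement) =====
-- stated objective: simpler
-- what changed: Instead of scanning with a growing seen-dictionary and accumulating a set of normalized pairs whose size is returned, B builds a Counter once and counts, over the distinct values, each value v that is the smaller member of a valid pair (v < target-v with the complement present, or v == target-v with multiplicity >= 2).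
import Mathlib
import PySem

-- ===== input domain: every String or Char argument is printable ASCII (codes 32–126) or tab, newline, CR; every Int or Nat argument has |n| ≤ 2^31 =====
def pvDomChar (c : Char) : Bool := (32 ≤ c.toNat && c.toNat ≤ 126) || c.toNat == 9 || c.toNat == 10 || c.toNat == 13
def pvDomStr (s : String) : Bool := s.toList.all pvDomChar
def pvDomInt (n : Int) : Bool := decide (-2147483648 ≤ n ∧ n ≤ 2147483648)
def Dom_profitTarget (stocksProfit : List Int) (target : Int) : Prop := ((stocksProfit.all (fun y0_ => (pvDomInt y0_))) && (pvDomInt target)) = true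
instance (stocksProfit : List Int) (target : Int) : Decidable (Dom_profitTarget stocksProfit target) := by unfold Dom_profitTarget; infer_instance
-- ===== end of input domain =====

-- B counts each distinct valid value-pair once from a Counter built up front, instead of
-- A's scan with a growing seen-dictionary and an accumulated set of normalized pairs (objective: simpler).

-- ===== PORT A =====
def profitTarget (stocksProfit : List Int) (target : Int) : Int :=
  let st := stocksProfit.foldl
    (fun (st : PySem.Set (Int × Int) × PySem.Dict Int Bool) num =>
      let complement := target - num
      let pairs :=
        if (st.2.contains complement) then
          PySem.Set.add st.1 (if complement ≤ num then (complement, num) else (num, complement))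
        else st.1
      (pairs, st.2.insert num true))
    (PySem.Set.empty, PySem.Dict.empty)
  PySem.Set.len st.1

-- ===== PORT B =====
def profitTarget_alt (stocksProfit : List Int) (target : Int) : Int :=
  let cnt := PySem.Dict.counter stocksProfit
  cnt.keys.foldl
    (fun res v =>
      let c := target - v
      if v < c ∧ cnt.contains c then res + 1
      else if v = c ∧ 2 ≤ cnt.getD v 0 then res + 1
      else res)
    0

-- ===== PRECONDITION & SPEC =====
def Spec_profitTarget (stocksProfit : List Int) (target : Int) (out : Int) : Prop := out = profitTarget_alt stocksProfit target
instance (stocksProfit : List Int) (target : Int) (out : Int) : Decidable (Spec_profitTarget stocksProfit target out) := by unfold Spec_profitTarget; infer_instance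

-- ===== CLAIM (what is proved, stated in full; the proofs are below) =====
def Claim_equal_profitTarget : Prop := ∀ (stocksProfit : List Int) (target : Int), Dom_profitTarget stocksProfit target → Spec_profitTarget stocksProfit target (profitTarget stocksProfit target)

-- ===== LEMMAS AND PROOFS =====

/-- The pairs A's set ends up holding, characterized against the whole list. -/
def Qual (l : List Int) (t : Int) (p : Int × Int) : Prop :=
  p.1 ≤ p.2 ∧ p.1 + p.2 = t ∧ p.1 ∈ l ∧ p.2 ∈ l ∧ (p.1 = p.2 → 2 ≤ l.count p.1)

/-- B's per-value test. -/
def QB (l : List Int) (t : Int) (v : Int) : Bool :=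
  (decide (v < t - v) && decide ((t - v) ∈ l)) || (decide (v = t - v) && decide (2 ≤ l.count v))

lemma qual_append_singleton (pre : List Int) (t num : Int) (p : Int × Int) :
    Qual (pre ++ [num]) t p ↔
      Qual pre t p ∨
        (p = (if t - num ≤ num then (t - num, num) else (num, t - num)) ∧ (t - num) ∈ pre) := by
  obtain ⟨a, b⟩ := p
  have hcnt : ∀ x : Int, (pre ++ [num]).count x = pre.count x + (if x = num then 1 else 0) := by
    intro x
    simp [List.count_append, List.count_singleton', eq_comm]
  unfold Qual
  simp only [List.mem_append, List.mem_singleton, hcnt]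
  constructor
  · rintro ⟨hab, hsum, ha, hb, hc2⟩
    by_cases hain : a ∈ pre
    · by_cases hbin : b ∈ pre
      · by_cases heq : a = b
        · by_cases h2 : 2 ≤ pre.count a
          · exact Or.inl ⟨hab, hsum, hain, hbin, fun _ => h2⟩
          · have h1 : 1 ≤ pre.count a := List.one_le_count_iff.mpr hain
            have hna : a = num := by
              by_contra hne
              simp [hne] at hc2
              omega
            have hcb : t - num = a := by omega
            refine Or.inr ⟨?_, by rw [hcb]; exact hain⟩
            rw [hcb]
            simp [← hna, ← heq]
        · exact Or.inl ⟨hab, hsum, hain, hbin, fun h => absurd h heq⟩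
      · have hbn : b = num := hb.resolve_left hbin
        have hca : t - num = a := by omega
        refine Or.inr ⟨?_, by rw [hca]; exact hain⟩
        rw [hca, if_pos (by omega)]
        simp [hbn]
    · have han : a = num := ha.resolve_left hain
      have hcb : t - num = b := by omega
      have hbin : b ∈ pre := by
        rcases hb with hb | hbn
        · exact hb
        · exfalso
          have heq : a = b := by omega
          have := hc2 heq
          have h1 : 1 ≤ pre.count a := by
            have : ¬ (2 : Nat) ≤ (if a = num then 1 else 0) := by simp [han]
            omega
          exact hain (List.one_le_count_iff.mp h1)
      refine Or.inr ⟨?_, by rw [hcb]; exact hbin⟩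
      by_cases hle : t - num ≤ num
      · have : b ≤ a := by omega
        have heq : a = b := le_antisymm hab this
        rw [if_pos hle]
        simp only [Prod.mk.injEq]
        omega
      · rw [if_neg hle]
        simp [hcb, han]
  · rintro (⟨hab, hsum, ha, hb, hc2⟩ | ⟨hp, hcpre⟩)
    · refine ⟨hab, hsum, Or.inl ha, Or.inl hb, fun h => ?_⟩
      have := hc2 h
      omega
    · by_cases hle : t - num ≤ num
      · rw [if_pos hle] at hp
        obtain ⟨ha, hb⟩ := Prod.mk.injEq .. ▸ hp
        refine ⟨by omega, by omega, Or.inl (ha ▸ hcpre), Or.inr hb, fun h => ?_⟩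
        have h1 : 1 ≤ pre.count a := List.one_le_count_iff.mpr (ha ▸ hcpre)
        have : a = num := by omega
        rw [if_pos this]
        omega
      · rw [if_neg hle] at hp
        obtain ⟨ha, hb⟩ := Prod.mk.injEq .. ▸ hp
        refine ⟨by omega, by omega, Or.inr ha, Or.inl (hb ▸ hcpre), fun h => ?_⟩
        omega

lemma loop_inv (t : Int) (l : List Int) : ∀ (pre : List Int) (S : PySem.Set (Int × Int))
    (D : PySem.Dict Int Bool),
    S.Nodup →
    (∀ k, D.contains k = true ↔ k ∈ pre) →
    (∀ p, p ∈ S ↔ Qual pre t p) →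
    (l.foldl (fun (st : PySem.Set (Int × Int) × PySem.Dict Int Bool) num =>
        let complement := t - num
        let pairs :=
          if (st.2.contains complement) then
            PySem.Set.add st.1 (if complement ≤ num then (complement, num) else (num, complement))
          else st.1
        (pairs, st.2.insert num true)) (S, D)).1.Nodup ∧
    (∀ p, p ∈ (l.foldl (fun (st : PySem.Set (Int × Int) × PySem.Dict Int Bool) num =>
        let complement := t - num
        let pairs :=
          if (st.2.contains complement) then
            PySem.Set.add st.1 (if complement ≤ num then (complement, num) else (num, complement))
          else st.1
        (pairs, st.2.insert num true)) (S, D)).1 ↔ Qual (pre ++ l) t p) := by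
  induction l with
  | nil =>
    intro pre S D hS hD hmem
    refine ⟨by simpa using hS, fun p => ?_⟩
    simp only [List.foldl_nil, List.append_nil]
    exact hmem p
  | cons num rest ih =>
    intro pre S D hS hD hmem
    simp only [List.foldl_cons]
    have hS' : (if (D.contains (t - num)) then
        PySem.Set.add S (if t - num ≤ num then (t - num, num) else (num, t - num)) else S).Nodup := by
      split_ifs <;> first | exact PySem.Set.nodup_add _ _ hS | exact hS
    have hD' : ∀ k, ((D.insert num true).contains k = true) ↔ k ∈ pre ++ [num] := by
      intro k
      rw [PySem.Dict.contains_insert]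
      simp only [Bool.or_eq_true, beq_iff_eq, hD k, List.mem_append, List.mem_singleton]
      tauto
    have hmem' : ∀ p, p ∈ (if (D.contains (t - num)) then
        PySem.Set.add S (if t - num ≤ num then (t - num, num) else (num, t - num)) else S) ↔
        Qual (pre ++ [num]) t p := by
      intro p
      rw [qual_append_singleton]
      by_cases hc : (t - num) ∈ pre
      · rw [if_pos ((hD _).mpr hc)]
        rw [PySem.Set.mem_add]
        simp [hmem p, hc]
      · rw [if_neg (by simpa [hD (t - num)] using hc)]
        simp [hmem p, hc]
    have h := ih (pre ++ [num]) _ _ hS' hD' hmem'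
    simpa [List.append_assoc] using h

lemma alt_foldl_count (l : List Int) (t : Int) (ks : List Int) (i : Int) :
    (ks.foldl (fun res v =>
      let c := t - v
      if v < c ∧ (PySem.Dict.counter l).contains c then res + 1
      else if v = c ∧ 2 ≤ (PySem.Dict.counter l).getD v 0 then res + 1
      else res) i)
      = i + (ks.countP (QB l t) : Int) := by
  induction ks generalizing i with
  | nil => simp
  | cons v ks ih =>
    simp only [List.foldl_cons, List.countP_cons]
    rw [ih]
    have hstep : (if v < t - v ∧ (PySem.Dict.counter l).contains (t - v) then i + 1
        else if v = t - v ∧ 2 ≤ (PySem.Dict.counter l).getD v 0 then i + 1 else i)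
        = i + (if QB l t v then 1 else 0) := by
      rw [PySem.Dict.contains_counter, PySem.Dict.getD_counter]
      by_cases hA : v < t - v ∧ l.contains (t - v) = true
      · rw [if_pos hA]
        have hq : QB l t v = true := by
          unfold QB
          simp only [Bool.or_eq_true, Bool.and_eq_true, decide_eq_true_eq]
          exact Or.inl ⟨hA.1, by simpa using hA.2⟩
        rw [hq]
        simp
      · rw [if_neg hA]
        by_cases hB : v = t - v ∧ (2 : Int) ≤ ((l.count v : Nat) : Int)
        · rw [if_pos hB]
          have hq : QB l t v = true := by
            unfold QB
            simp only [Bool.or_eq_true, Bool.and_eq_true, decide_eq_true_eq]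
            exact Or.inr ⟨hB.1, by exact_mod_cast hB.2⟩
          rw [hq]
          simp
        · rw [if_neg hB]
          have hq : QB l t v = false := by
            unfold QB
            rw [← Bool.not_eq_true]
            simp only [Bool.or_eq_true, Bool.and_eq_true, decide_eq_true_eq]
            rintro (⟨h1, h2⟩ | ⟨h1, h2⟩)
            · exact hA ⟨h1, by simpa using h2⟩
            · exact hB ⟨h1, by exact_mod_cast h2⟩
          rw [hq]
          simp
    rw [hstep]
    push_cast
    ring

lemma mem_pairs_map (l : List Int) (t : Int) (p : Int × Int) :
    (p ∈ ((PySem.Set.ofList l).filter (QB l t)).map (fun v => (v, t - v))) ↔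
      Qual l t p := by
  simp only [List.mem_map, List.mem_filter, PySem.Set.mem_ofList]
  constructor
  · rintro ⟨v, ⟨hv, hq⟩, rfl⟩
    unfold QB at hq
    simp only [Bool.or_eq_true, Bool.and_eq_true, decide_eq_true_eq] at hq
    unfold Qual
    rcases hq with ⟨h1, h2⟩ | ⟨h1, h2⟩
    · exact ⟨by omega, by omega, hv, h2, fun h => by simp at h; omega⟩
    · exact ⟨by omega, by omega, hv, by rw [← h1]; exact hv, fun _ => h2⟩
  · intro hq
    obtain ⟨hab, hsum, ha, hb, hc2⟩ := hq
    refine ⟨p.1, ⟨ha, ?_⟩, ?_⟩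
    · unfold QB
      simp only [Bool.or_eq_true, Bool.and_eq_true, decide_eq_true_eq]
      by_cases heq : p.1 = p.2
      · exact Or.inr ⟨by omega, hc2 heq⟩
      · exact Or.inl ⟨by omega, by rw [show t - p.1 = p.2 by omega]; exact hb⟩
    · have : t - p.1 = p.2 := by omega
      rw [this]

-- ===== VERDICT (by name: the statement is the Claim_ definition above) =====
theorem profitTarget_spec : Claim_equal_profitTarget := by
  intro l t _
  unfold Spec_profitTarget profitTarget profitTarget_alt
  dsimp only
  obtain ⟨hnd, hmem⟩ := loop_inv t l [] PySem.Set.empty PySem.Dict.empty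
    (by simp [PySem.Set.empty])
    (by intro k; simp [PySem.Dict.contains_empty])
    (by intro p; simp [PySem.Set.empty, Qual])
  simp only [List.nil_append] at hmem
  rw [PySem.Dict.keys_counter, alt_foldl_count]
  have hM : (((PySem.Set.ofList l).filter (QB l t)).map (fun v => (v, t - v))).Nodup := by
    refine List.Nodup.map ?_ ((PySem.Set.nodup_ofList l).filter _)
    intro a b h
    exact congrArg Prod.fst h
  have hperm : (l.foldl (fun (st : PySem.Set (Int × Int) × PySem.Dict Int Bool) num =>
      let complement := t - num
      let pairs :=
        if (st.2.contains complement) then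
          PySem.Set.add st.1 (if complement ≤ num then (complement, num) else (num, complement))
        else st.1
      (pairs, st.2.insert num true)) (PySem.Set.empty, PySem.Dict.empty)).1.Perm
      (((PySem.Set.ofList l).filter (QB l t)).map (fun v => (v, t - v))) := by
    rw [List.perm_ext_iff_of_nodup hnd hM]
    intro p
    rw [hmem p, mem_pairs_map]
  have hlen := hperm.length_eq
  rw [List.length_map, ← List.countP_eq_length_filter] at hlen
  show PySem.Set.len _ = 0 + _
  unfold PySem.Set.len
  rw [hlen]
  ring
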